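-- pv_equiv track=rewrite | github.com/ggjj321/12-yard-free-throw-server | fastapi_server/app/suggest.py | sum_of_row
-- ===== SOURCE A (Python) =====
-- def sum_of_row(data, arr):
--   count = top = mid = bot = 0
--   for key in data:
--     if 1 <= key <= 4:
--       top += data[key]
--     elif 5 <= key <= 8:
--       mid += data[key]
--     elif 9 <= key <= 12:
--       bot += data[key]
--   for ele in arr:
--     if ele == 1:
--       count += top
--     elif ele == 2:
--       count += mid
--     elif ele == 3:
--       count += bot
--   return count
-- ===== SOURCE B (Python) =====
-- def sum_of_row(data, arr):
--   needed = {}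
--   for ele in arr:
--     if 1 <= ele <= 3:
--       needed[ele] = needed.get(ele, 0) + 1
--   total = 0
--   for key in data:
--     if 1 <= key <= 12:
--       total += needed.get((key - 1) // 4 + 1, 0) * data[key]
--   return total
-- ===== Notes on version B (the rewrite author's own statement) =====
-- stated objective: alternative
-- what changed: Inverts the decomposition: instead of summing the dict values into three group totals and adding a group total per element of arr, B builds a frequency table of arr's relevant codes once and makes a single pass over the dict, adding each value multiplied by the frequency of its arithmetically computed group index (key-1)//4+1; no group sums top/mid/bot exist.
import Mathlib
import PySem

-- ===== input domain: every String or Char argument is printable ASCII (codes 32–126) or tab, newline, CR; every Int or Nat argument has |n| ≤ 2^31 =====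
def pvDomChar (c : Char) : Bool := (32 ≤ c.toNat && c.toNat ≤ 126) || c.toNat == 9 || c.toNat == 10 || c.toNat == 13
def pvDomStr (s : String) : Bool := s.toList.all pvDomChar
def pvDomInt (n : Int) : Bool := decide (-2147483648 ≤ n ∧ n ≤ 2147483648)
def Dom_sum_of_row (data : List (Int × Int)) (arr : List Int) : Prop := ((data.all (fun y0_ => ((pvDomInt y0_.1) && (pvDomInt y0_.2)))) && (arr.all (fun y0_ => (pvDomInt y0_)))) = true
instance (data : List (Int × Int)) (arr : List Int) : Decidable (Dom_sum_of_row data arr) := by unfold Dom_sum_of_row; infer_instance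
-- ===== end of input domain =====

-- B inverts A's decomposition: a frequency table of arr's codes is built first, then ONE pass over
-- the dict adds each value weighted by the frequency of its arithmetic group index (key-1)//4+1;
-- no group sums top/mid/bot exist. Objective: alternative.

-- ===== PORT A =====
-- 'for key in data' iterates the dict's keys; 'data[key]' is the lookup (key is present, so getD 0 is exact)
def sum_of_row (data : List (Int × Int)) (arr : List Int) : Int :=
  let d := PySem.Dict.ofList data
  let tmb := d.keys.foldl (fun (s : Int × Int × Int) key =>
      if 1 ≤ key ∧ key ≤ 4 then (s.1 + d.getD key 0, s.2.1, s.2.2)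
      else if 5 ≤ key ∧ key ≤ 8 then (s.1, s.2.1 + d.getD key 0, s.2.2)
      else if 9 ≤ key ∧ key ≤ 12 then (s.1, s.2.1, s.2.2 + d.getD key 0)
      else s) (0, 0, 0)
  arr.foldl (fun count ele =>
      if ele = 1 then count + tmb.1
      else if ele = 2 then count + tmb.2.1
      else if ele = 3 then count + tmb.2.2
      else count) 0

-- ===== PORT B =====
-- 'needed[ele] = needed.get(ele, 0) + 1' is insert with getD; '(key - 1) // 4' is floor division
def sum_of_row_alt (data : List (Int × Int)) (arr : List Int) : Int :=
  let needed := arr.foldl (fun (d : PySem.Dict Int Int) ele =>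
      if 1 ≤ ele ∧ ele ≤ 3 then d.insert ele (d.getD ele 0 + 1) else d) PySem.Dict.empty
  let dd := PySem.Dict.ofList data
  dd.keys.foldl (fun total key =>
      if 1 ≤ key ∧ key ≤ 12 then
        total + needed.getD (PySem.Int.floordiv (key - 1) 4 + 1) 0 * dd.getD key 0
      else total) 0

-- ===== PRECONDITION & SPEC =====
def Spec_sum_of_row (data : List (Int × Int)) (arr : List Int) (out : Int) : Prop := out = sum_of_row_alt data arr
instance (data : List (Int × Int)) (arr : List Int) (out : Int) : Decidable (Spec_sum_of_row data arr out) := by unfold Spec_sum_of_row; infer_instance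

-- ===== CLAIM (what is proved, stated in full; the proofs are below) =====
def Claim_equal_sum_of_row : Prop := ∀ (data : List (Int × Int)) (arr : List Int), Dom_sum_of_row data arr → Spec_sum_of_row data arr (sum_of_row data arr)

-- ===== LEMMAS AND PROOFS =====

-- B's frequency table: the conditional counter over arr reads back as a count (or the initial value
-- for codes outside 1..3, which are never inserted).
lemma pv_freq (arr : List Int) (d : PySem.Dict Int Int) (g : Int) :
    (arr.foldl (fun (d : PySem.Dict Int Int) ele =>
        if 1 ≤ ele ∧ ele ≤ 3 then d.insert ele (d.getD ele 0 + 1) else d) d).getD g 0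
    = d.getD g 0 + (if 1 ≤ g ∧ g ≤ 3 then (arr.count g : Int) else 0) := by
  induction arr generalizing d with
  | nil => simp
  | cons x xs ih =>
    simp only [List.foldl_cons]
    by_cases hx : 1 ≤ x ∧ x ≤ 3
    · rw [if_pos hx, ih, PySem.Dict.getD_insert]
      by_cases hg : g = x
      · subst hg
        simp [hx]
        ring
      · simp [hg, Ne.symm hg]
    · rw [if_neg hx, ih]
      by_cases hg : g = x
      · subst hg
        simp [hx]
      · simp [Ne.symm hg]

-- group index arithmetic: (key-1)//4 + 1 picks group 1/2/3 on the three key ranges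
lemma pv_grp1 (k : Int) (h : 1 ≤ k ∧ k ≤ 4) : PySem.Int.floordiv (k - 1) 4 + 1 = 1 := by
  rw [PySem.Int.floordiv_eq_ediv_of_pos (by omega)]; omega
lemma pv_grp2 (k : Int) (h : 5 ≤ k ∧ k ≤ 8) : PySem.Int.floordiv (k - 1) 4 + 1 = 2 := by
  rw [PySem.Int.floordiv_eq_ediv_of_pos (by omega)]; omega
lemma pv_grp3 (k : Int) (h : 9 ≤ k ∧ k ≤ 12) : PySem.Int.floordiv (k - 1) 4 + 1 = 3 := by
  rw [PySem.Int.floordiv_eq_ediv_of_pos (by omega)]; omega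

-- B's single pass over the keys equals the weighted filtered sums, given the three frequencies.
lemma pv_loopB (needed d : PySem.Dict Int Int) (l : List (Int × Int))
    (h : ∀ p ∈ l, d.getD p.1 0 = p.2) (c1 c2 c3 : Int)
    (h1 : needed.getD 1 0 = c1) (h2 : needed.getD 2 0 = c2) (h3 : needed.getD 3 0 = c3)
    (c : Int) :
    (l.map (·.1)).foldl (fun total key =>
      if 1 ≤ key ∧ key ≤ 12 then
        total + needed.getD (PySem.Int.floordiv (key - 1) 4 + 1) 0 * d.getD key 0
      else total) c
    = c + c1 * ((l.filter (fun p => decide (1 ≤ p.1 ∧ p.1 ≤ 4))).map (·.2)).sum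
        + c2 * ((l.filter (fun p => decide (5 ≤ p.1 ∧ p.1 ≤ 8))).map (·.2)).sum
        + c3 * ((l.filter (fun p => decide (9 ≤ p.1 ∧ p.1 ≤ 12))).map (·.2)).sum := by
  induction l generalizing c with
  | nil => simp
  | cons p rest ih =>
    have hp : d.getD p.1 0 = p.2 := h p (List.mem_cons_self ..)
    have hrest : ∀ q ∈ rest, d.getD q.1 0 = q.2 := fun q hq => h q (List.mem_cons_of_mem _ hq)
    simp only [List.map_cons, List.foldl_cons]
    by_cases hk1 : 1 ≤ p.1 ∧ p.1 ≤ 4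
    · have hk : 1 ≤ p.1 ∧ p.1 ≤ 12 := by omega
      have h2' : ¬(5 ≤ p.1 ∧ p.1 ≤ 8) := by omega
      have h3' : ¬(9 ≤ p.1 ∧ p.1 ≤ 12) := by omega
      rw [if_pos hk, pv_grp1 p.1 hk1, h1, hp, ih hrest]
      simp only [List.filter_cons]
      simp [hk1, h2', h3']
      ring
    · by_cases hk2 : 5 ≤ p.1 ∧ p.1 ≤ 8
      · have hk : 1 ≤ p.1 ∧ p.1 ≤ 12 := by omega
        have h3' : ¬(9 ≤ p.1 ∧ p.1 ≤ 12) := by omega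
        rw [if_pos hk, pv_grp2 p.1 hk2, h2, hp, ih hrest]
        simp only [List.filter_cons]
        simp [hk1, hk2, h3']
        ring
      · by_cases hk3 : 9 ≤ p.1 ∧ p.1 ≤ 12
        · have hk : 1 ≤ p.1 ∧ p.1 ≤ 12 := by omega
          rw [if_pos hk, pv_grp3 p.1 hk3, h3, hp, ih hrest]
          simp only [List.filter_cons]
          simp [hk1, hk2, hk3]
          ring
        · have hk : ¬(1 ≤ p.1 ∧ p.1 ≤ 12) := by omega
          rw [if_neg hk, ih hrest]
          simp only [List.filter_cons]
          simp [hk1, hk2, hk3]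

-- A's first loop over the keys of d equals the three filtered sums over an item list whose
-- lookups agree with d (induction over the item list, accumulator generalized).
lemma pv_loop1 (d : PySem.Dict Int Int) (l : List (Int × Int))
    (h : ∀ p ∈ l, d.getD p.1 0 = p.2) (t m b : Int) :
    (l.map (·.1)).foldl (fun (s : Int × Int × Int) key =>
      if 1 ≤ key ∧ key ≤ 4 then (s.1 + d.getD key 0, s.2.1, s.2.2)
      else if 5 ≤ key ∧ key ≤ 8 then (s.1, s.2.1 + d.getD key 0, s.2.2)
      else if 9 ≤ key ∧ key ≤ 12 then (s.1, s.2.1, s.2.2 + d.getD key 0)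
      else s) (t, m, b)
    = (t + ((l.filter (fun p => decide (1 ≤ p.1 ∧ p.1 ≤ 4))).map (·.2)).sum,
       m + ((l.filter (fun p => decide (5 ≤ p.1 ∧ p.1 ≤ 8))).map (·.2)).sum,
       b + ((l.filter (fun p => decide (9 ≤ p.1 ∧ p.1 ≤ 12))).map (·.2)).sum) := by
  induction l generalizing t m b with
  | nil => simp
  | cons p rest ih =>
    have hp : d.getD p.1 0 = p.2 := h p (List.mem_cons_self ..)
    have hrest : ∀ q ∈ rest, d.getD q.1 0 = q.2 := fun q hq => h q (List.mem_cons_of_mem _ hq)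
    simp only [List.map_cons, List.foldl_cons, List.filter_cons]
    by_cases h1 : 1 ≤ p.1 ∧ p.1 ≤ 4
    · have h2 : ¬(5 ≤ p.1 ∧ p.1 ≤ 8) := by omega
      have h3 : ¬(9 ≤ p.1 ∧ p.1 ≤ 12) := by omega
      simp [h1, h2, h3, hp, ih hrest]
      omega
    · by_cases h2 : 5 ≤ p.1 ∧ p.1 ≤ 8
      · have h3 : ¬(9 ≤ p.1 ∧ p.1 ≤ 12) := by omega
        simp [h1, h2, h3, hp, ih hrest]
        omega
      · by_cases h3 : 9 ≤ p.1 ∧ p.1 ≤ 12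
        · simp [h1, h2, h3, hp, ih hrest]
          omega
        · simp [h1, h2, h3, ih hrest]

-- A's second loop equals count-then-weighted-combine.
lemma pv_loop2 (top mid bot : Int) (arr : List Int) (c : Int) :
    arr.foldl (fun count ele =>
      if ele = 1 then count + top
      else if ele = 2 then count + mid
      else if ele = 3 then count + bot
      else count) c
    = c + (arr.count 1 : Int) * top + (arr.count 2 : Int) * mid + (arr.count 3 : Int) * bot := by
  induction arr generalizing c with
  | nil => simp
  | cons x xs ih =>
    simp only [List.foldl_cons, ih, List.count_cons]
    by_cases h1 : x = 1 <;> by_cases h2 : x = 2 <;> by_cases h3 : x = 3 <;>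
      simp [h1, h2, h3] <;> ring

-- ===== VERDICT (by name: the statement is the Claim_ definition above) =====
theorem sum_of_row_spec : Claim_equal_sum_of_row := by
  intro data arr _
  unfold Spec_sum_of_row sum_of_row sum_of_row_alt
  set d := PySem.Dict.ofList data with hd
  have hnd : d.keys.Nodup := PySem.Dict.nodup_keys_ofList data
  have hagree : ∀ p ∈ d.items, d.getD p.1 0 = p.2 := by
    intro p hp
    obtain ⟨k, v⟩ := p
    exact PySem.Dict.getD_of_mem_items d hp hnd 0
  have hkeys : d.keys = d.items.map (·.1) := rfl
  have hfreq := fun g => pv_freq arr PySem.Dict.empty g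
  simp only [PySem.Dict.getD_empty, zero_add] at hfreq
  simp only [hkeys,
    pv_loop1 d d.items hagree 0 0 0,
    pv_loopB _ d d.items hagree ((arr.count 1 : Int)) ((arr.count 2 : Int)) ((arr.count 3 : Int))
      (by rw [hfreq 1]; norm_num) (by rw [hfreq 2]; norm_num) (by rw [hfreq 3]; norm_num),
    pv_loop2]
  ring
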